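-- pv_equiv track=rewrite | github.com/purnadip-manna/Problems | Sell_Stock_prob.py | indexOfIncSub
-- ===== SOURCE A (Python) =====
-- def indexOfIncSub(arr):
--     n = len(arr)
--     indexList = []
--     start = l = 0
--     for i in range(1, n):
--         if arr[i]>arr[i-1]:
--             l+=1
--
--         else:
--             l = 0
--             indexList.append((start, i-1))
--             start = i
--
--     if l:
--         indexList.append((start, n-1))
--
--     return indexList
-- ===== SOURCE B (Python) =====
-- def indexOfIncSub(arr):
--     n = len(arr)
--     breaks = [i for i in range(1, n) if arr[i] <= arr[i - 1]]
--     res = list(zip([0] + breaks, [b - 1 for b in breaks]))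
--     last_start = breaks[-1] if breaks else 0
--     if last_start < n - 1:
--         res.append((last_start, n - 1))
--     return res
-- ===== Notes on version B (the rewrite author's own statement) =====
-- stated objective: alternative
-- what changed: Replaces A's single stateful scan carrying (indexList, start, l) with a two-phase decomposition: first collect the break indices, then build the ranges by a truncating zip of starts with ends and append the tail range exactly when the last break (or 0) precedes the last index.
import Mathlib
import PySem

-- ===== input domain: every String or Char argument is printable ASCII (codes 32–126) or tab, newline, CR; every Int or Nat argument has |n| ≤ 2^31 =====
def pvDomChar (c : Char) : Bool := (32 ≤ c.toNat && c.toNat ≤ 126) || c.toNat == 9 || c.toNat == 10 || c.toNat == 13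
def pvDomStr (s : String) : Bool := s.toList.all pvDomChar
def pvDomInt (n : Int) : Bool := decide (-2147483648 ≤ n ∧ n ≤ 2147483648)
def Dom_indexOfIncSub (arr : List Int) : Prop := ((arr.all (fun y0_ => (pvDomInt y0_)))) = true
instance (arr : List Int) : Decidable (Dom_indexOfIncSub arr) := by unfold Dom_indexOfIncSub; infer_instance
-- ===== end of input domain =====

-- B re-implements the same scan as a two-phase decomposition (break indices, then zip); same cost, no behaviour change.

-- ===== PORT A =====
-- one fold over range(1,n) carrying (indexList, start, l); arr[i] indices are always in range, so pyGetD's default is never used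
def indexOfIncSub (arr : List Int) : List (Int × Int) :=
  let n : Int := arr.length
  let s := (PySem.List.pyRange 1 n 1).foldl
    (fun (st : List (Int × Int) × Int × Int) i =>
      if PySem.List.pyGetD arr i 0 > PySem.List.pyGetD arr (i - 1) 0 then
        (st.1, st.2.1, st.2.2 + 1)
      else
        (st.1 ++ [(st.2.1, i - 1)], i, 0))
    ([], 0, 0)
  if s.2.2 ≠ 0 then s.1 ++ [(s.2.1, n - 1)] else s.1

-- ===== PORT B =====
def indexOfIncSub_alt (arr : List Int) : List (Int × Int) :=
  let n : Int := arr.length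
  let breaks := (PySem.List.pyRange 1 n 1).filter
    (fun i => PySem.List.pyGetD arr i 0 ≤ PySem.List.pyGetD arr (i - 1) 0)
  let res := List.zip (0 :: breaks) (breaks.map (· - 1))
  let last_start := breaks.getLast?.getD 0
  if last_start < n - 1 then res ++ [(last_start, n - 1)] else res

-- ===== PRECONDITION & SPEC =====
def Spec_indexOfIncSub (arr : List Int) (out : List (Int × Int)) : Prop := out = indexOfIncSub_alt arr
instance (arr : List Int) (out : List (Int × Int)) : Decidable (Spec_indexOfIncSub arr out) := by unfold Spec_indexOfIncSub; infer_instance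

-- ===== CLAIM (what is proved, stated in full; the proofs are below) =====
def Claim_equal_indexOfIncSub : Prop := ∀ (arr : List Int), Dom_indexOfIncSub arr → Spec_indexOfIncSub arr (indexOfIncSub arr)

-- ===== LEMMAS AND PROOFS =====

-- proof-side abbreviations
def pvStep (arr : List Int) (st : List (Int × Int) × Int × Int) (i : Int) :
    List (Int × Int) × Int × Int :=
  if PySem.List.pyGetD arr i 0 > PySem.List.pyGetD arr (i - 1) 0 then
    (st.1, st.2.1, st.2.2 + 1)
  else
    (st.1 ++ [(st.2.1, i - 1)], i, 0)

def pvBrk (arr : List Int) (i : Int) : Bool :=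
  PySem.List.pyGetD arr i 0 ≤ PySem.List.pyGetD arr (i - 1) 0

def pvInterior (bs : List Int) : List (Int × Int) := List.zip (0 :: bs) (bs.map (· - 1))

lemma pv_zip_aux (a b : Int) (bs : List Int) :
    List.zip (a :: (bs ++ [b])) ((bs ++ [b]).map (· - 1)) =
      List.zip (a :: bs) (bs.map (· - 1)) ++ [(bs.getLast?.getD a, b - 1)] := by
  induction bs generalizing a with
  | nil => simp [List.zip]
  | cons c cs ih =>
    simp only [List.cons_append, List.map_cons, List.zip_cons_cons, ih c]
    cases cs <;> simp [List.getLast?_cons]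

lemma pvInterior_append (bs : List Int) (b : Int) :
    pvInterior (bs ++ [b]) = pvInterior bs ++ [(bs.getLast?.getD 0, b - 1)] := by
  simpa [pvInterior] using pv_zip_aux 0 b bs

-- fold invariant: after processing indices 1..m-1, the state is (interior of breaks, last break (or 0), m-1 - that)
lemma pv_invariant (arr : List Int) (m : Nat) (hm : 1 ≤ m) :
    (PySem.List.pyRange 1 (m : Int) 1).foldl (pvStep arr) ([], 0, 0) =
      (pvInterior ((PySem.List.pyRange 1 (m : Int) 1).filter (pvBrk arr)),
       ((PySem.List.pyRange 1 (m : Int) 1).filter (pvBrk arr)).getLast?.getD 0,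
       (m : Int) - 1 - ((PySem.List.pyRange 1 (m : Int) 1).filter (pvBrk arr)).getLast?.getD 0) := by
  induction m with
  | zero => omega
  | succ k ih =>
    rcases Nat.lt_or_ge k 1 with hk | hk
    · interval_cases k
      simp [PySem.List.pyRange, pvInterior]
    · have hrec : PySem.List.pyRange 1 ((k + 1 : Nat) : Int) 1 =
          PySem.List.pyRange 1 (k : Int) 1 ++ [(k : Int)] := by
        have := PySem.List.pyRange_one_succ_right (a := 1) (b := (k : Int)) (by exact_mod_cast hk)
        simpa [Nat.cast_add, Nat.cast_one] using this
      rw [hrec, List.foldl_append, ih hk, List.filter_append]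
      by_cases hb : pvBrk arr (k : Int)
      · simp only [List.filter_cons, List.filter_nil, hb, if_pos, List.foldl_cons, List.foldl_nil]
        rw [pvInterior_append]
        have hstep : pvStep arr
            (pvInterior ((PySem.List.pyRange 1 (k : Int) 1).filter (pvBrk arr)),
             ((PySem.List.pyRange 1 (k : Int) 1).filter (pvBrk arr)).getLast?.getD 0,
             (k : Int) - 1 - ((PySem.List.pyRange 1 (k : Int) 1).filter (pvBrk arr)).getLast?.getD 0) (k : Int) =
            (pvInterior ((PySem.List.pyRange 1 (k : Int) 1).filter (pvBrk arr)) ++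
               [(((PySem.List.pyRange 1 (k : Int) 1).filter (pvBrk arr)).getLast?.getD 0, (k : Int) - 1)],
             (k : Int), 0) := by
          unfold pvStep
          rw [if_neg]
          simp only [pvBrk, decide_eq_true_eq] at hb
          omega
        rw [hstep]
        simp
      · simp only [List.filter_cons, List.filter_nil, hb, if_neg, Bool.false_eq_true,
          not_false_eq_true, List.append_nil, List.foldl_cons, List.foldl_nil]
        unfold pvStep
        rw [if_pos]
        · simp only [Prod.mk.injEq, true_and]
          push_cast; ring
        · simp only [pvBrk, decide_eq_true_eq] at hb
          omega

-- every break index is at most m-1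
lemma pv_lastb_le (arr : List Int) (m : Nat) :
    ((PySem.List.pyRange 1 (m : Int) 1).filter (pvBrk arr)).getLast?.getD 0 ≤ (m : Int) - 1 ∨
      ((PySem.List.pyRange 1 (m : Int) 1).filter (pvBrk arr)) = [] := by
  cases hl : ((PySem.List.pyRange 1 (m : Int) 1).filter (pvBrk arr)).getLast? with
  | none => right; exact List.getLast?_eq_none_iff.mp hl
  | some x =>
    left
    have hx : x ∈ (PySem.List.pyRange 1 (m : Int) 1).filter (pvBrk arr) := by
      rcases List.getLast?_eq_some_iff.mp hl with ⟨l', hl'⟩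
      rw [hl']; simp
    have hx' : x ∈ PySem.List.pyRange 1 (m : Int) 1 := List.mem_of_mem_filter hx
    have := (PySem.List.mem_pyRange_one).mp hx'
    simp only [Option.getD_some]; omega

-- ===== VERDICT (by name: the statement is the Claim_ definition above) =====
theorem indexOfIncSub_spec : Claim_equal_indexOfIncSub := by
  unfold Claim_equal_indexOfIncSub
  intro arr _
  unfold Spec_indexOfIncSub indexOfIncSub indexOfIncSub_alt
  rcases Nat.eq_zero_or_pos arr.length with h0 | hpos
  · simp [h0, PySem.List.pyRange]
  · have hstep : (fun (st : List (Int × Int) × Int × Int) i =>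
        if PySem.List.pyGetD arr i 0 > PySem.List.pyGetD arr (i - 1) 0 then
          (st.1, st.2.1, st.2.2 + 1)
        else
          (st.1 ++ [(st.2.1, i - 1)], i, 0)) = pvStep arr := rfl
    have hbrk : (fun i => decide (PySem.List.pyGetD arr i 0 ≤ PySem.List.pyGetD arr (i - 1) 0))
        = pvBrk arr := rfl
    simp only [hstep, hbrk, pv_invariant arr arr.length hpos]
    set bs := (PySem.List.pyRange 1 ((arr.length : Nat) : Int) 1).filter (pvBrk arr) with hbs
    have hzip : (0 :: bs).zip (bs.map (· - 1)) = pvInterior bs := rfl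
    rw [hzip]
    rcases pv_lastb_le arr arr.length with hle | hnil
    · rw [← hbs] at hle
      by_cases hlt : bs.getLast?.getD 0 < (arr.length : Int) - 1
      · rw [if_pos (by omega), if_pos hlt]
      · rw [if_neg (by omega), if_neg hlt]
    · rw [← hbs] at hnil
      rw [hnil]
      have hn1 : (1 : Int) ≤ arr.length := by exact_mod_cast hpos
      by_cases h2 : (arr.length : Int) ≥ 2
      · rw [if_pos (by simp; omega), if_pos (by simp; omega)]
      · rw [if_neg (by simp; omega), if_neg (by simp; omega)]
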